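-- pv_equiv track=rewrite | github.com/zwep/phd | objective_helper/reconstruction.py | get_square_ordered_idxs
-- ===== SOURCE A (Python) =====
-- def get_square_ordered_idxs(square_side_size: int, square_id: int):
--     """Returns ordered (clockwise) indices of a sub-square of a square matrix.
--
--     Parameters
--     ----------
--     square_side_size: int
--         Square side size. Dim of array.
--     square_id: int
--         Number of sub-square. Can be 0, ..., square_side_size // 2.
--
--     Returns
--     -------
--     ordered_idxs: List of tuples.
--         Indices of each point that belongs to the square_id-th sub-square
--         starting from top-left point clockwise.
--     """
--     assert square_id in range(square_side_size // 2)
--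
--     ordered_idxs = list()
--
--     for col in range(square_id, square_side_size - square_id):
--         ordered_idxs.append((square_id, col))
--
--     for row in range(square_id + 1, square_side_size - (square_id + 1)):
--         ordered_idxs.append((row, square_side_size - (square_id + 1)))
--
--     for col in range(square_side_size - (square_id + 1), square_id, -1):
--         ordered_idxs.append((square_side_size - (square_id + 1), col))
--
--     for row in range(square_side_size - (square_id + 1), square_id, -1):
--         ordered_idxs.append((row, square_id))
--
--     return tuple(ordered_idxs)
-- ===== SOURCE B (Python) =====
-- def get_square_ordered_idxs(square_side_size: int, square_id: int):
--     """Same result as A: walk the ring perimeter with one loop and a turning heading."""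
--     assert square_id in range(square_side_size // 2)
--     lo = square_id
--     hi = square_side_size - square_id - 1
--     r, c = lo, lo
--     dr, dc = 0, 1
--     result = []
--     for _ in range(4 * (hi - lo)):
--         result.append((r, c))
--         nr, nc = r + dr, c + dc
--         if not (lo <= nr <= hi and lo <= nc <= hi):
--             dr, dc = dc, -dr
--             nr, nc = r + dr, c + dc
--         r, c = nr, nc
--     return tuple(result)
-- ===== Notes on version B (the rewrite author's own statement) =====
-- stated objective: alternative
-- what changed: Replaces the four edge-specific range loops by a single perimeter walk that maintains a position and a heading, turning clockwise whenever the next step would leave the ring, emitting exactly 4*(hi-lo) points.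
import Mathlib
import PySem

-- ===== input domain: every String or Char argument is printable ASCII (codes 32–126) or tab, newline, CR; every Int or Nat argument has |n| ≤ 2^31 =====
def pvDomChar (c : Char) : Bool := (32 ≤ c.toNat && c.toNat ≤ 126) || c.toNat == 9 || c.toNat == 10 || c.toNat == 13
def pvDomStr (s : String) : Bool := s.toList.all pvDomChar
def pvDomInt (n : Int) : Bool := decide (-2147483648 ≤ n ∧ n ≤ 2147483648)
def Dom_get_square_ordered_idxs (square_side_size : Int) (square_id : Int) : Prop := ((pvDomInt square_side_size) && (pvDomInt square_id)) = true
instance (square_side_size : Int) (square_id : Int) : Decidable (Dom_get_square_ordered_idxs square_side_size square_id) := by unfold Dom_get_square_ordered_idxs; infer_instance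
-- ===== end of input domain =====

-- B replaces the four edge-specific range loops by one perimeter walk with a turning heading (alternative decomposition, same cost).

-- ===== PORT A =====
-- literal transliteration: four range loops appending to an accumulator list
def get_square_ordered_idxs (square_side_size : Int) (square_id : Int) : List (Int × Int) :=
  let l1 := (PySem.List.pyRange square_id (square_side_size - square_id) 1).foldl
      (fun acc col => acc ++ [(square_id, col)]) []
  let l2 := (PySem.List.pyRange (square_id + 1) (square_side_size - (square_id + 1)) 1).foldl
      (fun acc row => acc ++ [(row, square_side_size - (square_id + 1))]) l1
  let l3 := (PySem.List.pyRange (square_side_size - (square_id + 1)) square_id (-1)).foldl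
      (fun acc col => acc ++ [(square_side_size - (square_id + 1), col)]) l2
  (PySem.List.pyRange (square_side_size - (square_id + 1)) square_id (-1)).foldl
      (fun acc row => acc ++ [(row, square_id)]) l3

-- ===== PORT B =====
-- the walk loop of Source B: emit (r,c), then step by (dr,dc), turning clockwise ((dr,dc) -> (dc,-dr)) if the step leaves the ring
def pvWalk (lo hi r c dr dc : Int) : Nat → List (Int × Int)
  | 0 => []
  | k + 1 =>
    if lo ≤ r + dr ∧ r + dr ≤ hi ∧ lo ≤ c + dc ∧ c + dc ≤ hi then
      (r, c) :: pvWalk lo hi (r + dr) (c + dc) dr dc k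
    else
      (r, c) :: pvWalk lo hi (r + dc) (c - dr) dc (-dr) k

def get_square_ordered_idxs_alt (square_side_size : Int) (square_id : Int) : List (Int × Int) :=
  let lo := square_id
  let hi := square_side_size - square_id - 1
  pvWalk lo hi lo lo 0 1 (4 * (hi - lo)).toNat

-- ===== PRECONDITION & SPEC =====
-- Pre_: exactly A's assert 'square_id in range(square_side_size // 2)'; outside it A raises AssertionError.
def Pre_get_square_ordered_idxs (square_side_size : Int) (square_id : Int) : Prop :=
  0 ≤ square_id ∧ square_id < PySem.Int.floordiv square_side_size 2
instance (square_side_size : Int) (square_id : Int) : Decidable (Pre_get_square_ordered_idxs square_side_size square_id) := by unfold Pre_get_square_ordered_idxs; infer_instance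

def pvWitness_get_square_ordered_idxs : Int × Int := (5, 1)

def Spec_get_square_ordered_idxs (square_side_size : Int) (square_id : Int) (out : List (Int × Int)) : Prop := out = get_square_ordered_idxs_alt square_side_size square_id
instance (square_side_size : Int) (square_id : Int) (out : List (Int × Int)) : Decidable (Spec_get_square_ordered_idxs square_side_size square_id out) := by unfold Spec_get_square_ordered_idxs; infer_instance

-- ===== CLAIM (what is proved, stated in full; the proofs are below) =====
def Claim_equal_get_square_ordered_idxs : Prop := ∀ (square_side_size : Int) (square_id : Int), Dom_get_square_ordered_idxs square_side_size square_id → Pre_get_square_ordered_idxs square_side_size square_id → Spec_get_square_ordered_idxs square_side_size square_id (get_square_ordered_idxs square_side_size square_id)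

-- ===== LEMMAS AND PROOFS =====

theorem foldl_append_singleton {α β : Type} (f : α → β) :
    ∀ (l : List α) (acc : List β), l.foldl (fun a x => a ++ [f x]) acc = acc ++ l.map f := by
  intro l
  induction l with
  | nil => intro acc; simp
  | cons x xs ih => intro acc; simp [List.foldl, ih]

-- top edge (heading (0,1)): straight until (lo,hi), then turn to (1,0)
theorem pvWalk_top (lo hi : Int) :
    ∀ (j rest : Nat) (c : Int), c = hi - (j : Int) → (j : Int) ≤ hi - lo →
      pvWalk lo hi lo c 0 1 (j + 1 + rest) =
        (List.range (j + 1)).map (fun (i : Nat) => (lo, c + (i : Int))) ++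
          pvWalk lo hi (lo + 1) hi 1 0 rest := by
  intro j
  induction j with
  | zero =>
    intro rest c hc hj
    rw [show 0 + 1 + rest = rest + 1 from by omega]
    simp only [pvWalk]
    rw [if_neg (by omega)]
    subst hc
    norm_num
  | succ j ih =>
    intro rest c hc hj
    rw [show j + 1 + 1 + rest = (j + 1 + rest) + 1 from by omega]
    simp only [pvWalk]
    rw [if_pos (by push_cast at hc hj; constructor <;> [omega; (constructor <;> [omega; (constructor <;> omega)])])]
    rw [show lo + 0 = lo from by ring]
    rw [ih rest (c + 1) (by push_cast at hc ⊢; omega) (by push_cast at hj ⊢; omega)]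
    simp only [List.range_succ_eq_map, List.map_cons, List.map_map, List.cons_append]
    congr 1
    · simp only [Prod.mk.injEq]; constructor <;> push_cast <;> ring
    congr 1
    · simp only [Prod.mk.injEq]; constructor <;> push_cast <;> ring
    congr 1
    apply List.map_congr_left
    intro i _
    simp only [Function.comp_apply, Prod.mk.injEq]
    constructor <;> push_cast <;> ring

-- right edge (heading (1,0)): straight until (hi,hi), then turn to (0,-1)
theorem pvWalk_right (lo hi : Int) :
    ∀ (j rest : Nat) (r : Int), r = hi - (j : Int) → (j : Int) ≤ hi - lo - 1 →
      pvWalk lo hi r hi 1 0 (j + 1 + rest) =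
        (List.range (j + 1)).map (fun (i : Nat) => (r + (i : Int), hi)) ++
          pvWalk lo hi hi (hi - 1) 0 (-1) rest := by
  intro j
  induction j with
  | zero =>
    intro rest r hr hj
    rw [show 0 + 1 + rest = rest + 1 from by omega]
    simp only [pvWalk]
    rw [if_neg (by omega)]
    subst hr
    norm_num
  | succ j ih =>
    intro rest r hr hj
    rw [show j + 1 + 1 + rest = (j + 1 + rest) + 1 from by omega]
    simp only [pvWalk]
    rw [if_pos (by push_cast at hr hj; constructor <;> [omega; (constructor <;> [omega; (constructor <;> omega)])])]
    rw [show hi + 0 = hi from by ring]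
    rw [ih rest (r + 1) (by push_cast at hr ⊢; omega) (by push_cast at hj ⊢; omega)]
    simp only [List.range_succ_eq_map, List.map_cons, List.map_map, List.cons_append]
    congr 1
    · simp only [Prod.mk.injEq]; constructor <;> push_cast <;> ring
    congr 1
    · simp only [Prod.mk.injEq]; constructor <;> push_cast <;> ring
    congr 1
    apply List.map_congr_left
    intro i _
    simp only [Function.comp_apply, Prod.mk.injEq]
    constructor <;> push_cast <;> ring

-- bottom edge (heading (0,-1)): straight until (hi,lo), then turn to (-1,0)
theorem pvWalk_bottom (lo hi : Int) :
    ∀ (j rest : Nat) (c : Int), c = lo + (j : Int) → (j : Int) ≤ hi - lo - 1 →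
      pvWalk lo hi hi c 0 (-1) (j + 1 + rest) =
        (List.range (j + 1)).map (fun (i : Nat) => (hi, c - (i : Int))) ++
          pvWalk lo hi (hi - 1) lo (-1) 0 rest := by
  intro j
  induction j with
  | zero =>
    intro rest c hc hj
    rw [show 0 + 1 + rest = rest + 1 from by omega]
    simp only [pvWalk]
    rw [if_neg (by omega)]
    subst hc
    rw [show hi + -1 = hi - 1 from by ring]
    norm_num
  | succ j ih =>
    intro rest c hc hj
    rw [show j + 1 + 1 + rest = (j + 1 + rest) + 1 from by omega]
    simp only [pvWalk]
    rw [if_pos (by push_cast at hc hj; constructor <;> [omega; (constructor <;> [omega; (constructor <;> omega)])])]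
    rw [show hi + 0 = hi from by ring]
    rw [ih rest (c + -1) (by push_cast at hc ⊢; omega) (by push_cast at hj ⊢; omega)]
    simp only [List.range_succ_eq_map, List.map_cons, List.map_map, List.cons_append]
    congr 1
    · simp only [Prod.mk.injEq]; constructor <;> push_cast <;> ring
    congr 1
    · simp only [Prod.mk.injEq]; constructor <;> push_cast <;> ring
    congr 1
    apply List.map_congr_left
    intro i _
    simp only [Function.comp_apply, Prod.mk.injEq]
    constructor <;> push_cast <;> ring

-- left edge (heading (-1,0)): the fuel runs out just before (lo,lo)
theorem pvWalk_left (lo hi : Int) :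
    ∀ (j : Nat) (r : Int), r = lo + (j : Int) → (j : Int) ≤ hi - lo - 1 →
      pvWalk lo hi r lo (-1) 0 j = (List.range j).map (fun (i : Nat) => (r - (i : Int), lo)) := by
  intro j
  induction j with
  | zero => intro r _ _; simp [pvWalk]
  | succ j ih =>
    intro r hr hj
    simp only [pvWalk]
    rw [if_pos (by push_cast at hr hj; constructor <;> [omega; (constructor <;> [omega; (constructor <;> omega)])])]
    rw [show lo + 0 = lo from by ring]
    rw [ih (r + -1) (by push_cast at hr ⊢; omega) (by push_cast at hj ⊢; omega)]
    simp only [List.range_succ_eq_map, List.map_cons, List.map_map]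
    congr 1
    · simp only [Prod.mk.injEq]; constructor <;> push_cast <;> ring
    apply List.map_congr_left
    intro i _
    simp only [Function.comp_apply, Prod.mk.injEq]
    constructor <;> push_cast <;> ring

-- ===== VERDICT (by name: the statement is the Claim_ definition above) =====
theorem get_square_ordered_idxs_spec : Claim_equal_get_square_ordered_idxs := by
  intro n q _ hpre
  obtain ⟨hq0, hq1⟩ := hpre
  have h2 : (q + 1) * 2 ≤ n := by
    have := (PySem.Int.le_floordiv_iff_mul_le (a := n) (b := 2) (q := q + 1) (by norm_num)).mp (by omega)
    exact this
  simp only [Spec_get_square_ordered_idxs, get_square_ordered_idxs, get_square_ordered_idxs_alt]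
  set lo := q with hlo
  set hi := n - q - 1 with hhi
  have hm0 : (1 : Int) ≤ hi - lo := by omega
  set m : Nat := (hi - lo).toNat with hmdef
  have hm : (m : Int) = hi - lo := Int.toNat_of_nonneg (by omega)
  have hm1 : 1 ≤ m := by omega
  -- B side: four straight segments
  rw [show (4 * (hi - lo)).toNat = m + 1 + ((m - 1) + 1 + ((m - 1) + 1 + (m - 1))) from by omega]
  rw [pvWalk_top lo hi m _ lo (by omega) (by omega)]
  rw [pvWalk_right lo hi (m - 1) _ (lo + 1) (by omega) (by omega)]
  rw [pvWalk_bottom lo hi (m - 1) _ (hi - 1) (by omega) (by omega)]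
  rw [pvWalk_left lo hi (m - 1) (hi - 1) (by omega) (by omega)]
  -- A side: four ranges
  rw [foldl_append_singleton, foldl_append_singleton, foldl_append_singleton, foldl_append_singleton]
  rw [PySem.List.pyRange_one, PySem.List.pyRange_one, PySem.List.pyRange_neg_one]
  rw [show (n - q - q).toNat = m + 1 from by omega]
  rw [show (n - (q + 1) - (q + 1)).toNat = m - 1 from by omega]
  rw [show (n - (q + 1) - q).toNat = m from by omega]
  rw [show n - (q + 1) = hi from by omega]
  simp only [List.map_map, List.nil_append, List.append_assoc]
  -- write m = t + 1 so no Nat subtraction remains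
  obtain ⟨t, ht⟩ : ∃ t, m = t + 1 := ⟨m - 1, by omega⟩
  rw [ht]
  simp only [Nat.add_sub_cancel]
  have hht : hi = lo + (t : Int) + 1 := by omega
  -- the top edges coincide syntactically
  congr 1
  -- split A's seg3/seg4 at their first element, B's right/bottom segments at their last
  conv_lhs => rw [List.range_succ_eq_map]
  conv_rhs => rw [List.range_succ]
  simp only [List.map_append, List.map_cons, List.map_map, List.map_nil, List.cons_append,
    List.append_assoc, List.nil_append, Function.comp, Nat.cast_zero,
    sub_zero]
  congr 1
  congr 1
  · -- the corner (hi, hi)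
    simp only [Prod.mk.injEq]
    refine ⟨?_, trivial⟩
    rw [hht]; ring
  congr 1
  · -- straight part of the bottom edge
    apply List.map_congr_left; intro i _
    simp only [Function.comp_apply, Prod.mk.injEq]
    refine ⟨trivial, ?_⟩
    push_cast; ring
  congr 1
  · -- the corner (hi, lo)
    simp only [Prod.mk.injEq]
    refine ⟨trivial, ?_⟩
    rw [hht]; ring
  -- the left edge
  apply List.map_congr_left; intro i _
  simp only [Function.comp_apply, Prod.mk.injEq]
  refine ⟨?_, trivial⟩
  push_cast; ring
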